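-- pv_equiv track=rewrite | github.com/SergeVL/petlsql | petlsql/yamldriver.py | asdict
-- ===== SOURCE A (Python) =====
-- from collections import OrderedDict
--
-- def asdict(hdr, row):
--     flds = [str(f) for f in hdr]
--     try:
--         items = [(flds[i], row[i]) for i in range(len(flds)) if row[i] is not None]
--     except IndexError:
--         items = list()
--         for i, f in enumerate(flds):
--             try:
--                 v = row[i]
--             except IndexError:
--                 v = None
--             if v is not None:
--                 items.append((f, v))
--     return OrderedDict(items)
-- ===== SOURCE B (Python) =====
-- from collections import OrderedDict
--
-- def asdict(hdr, row):
--     flds = [str(f) for f in hdr]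
--     return OrderedDict((f, v) for f, v in zip(flds, row) if v is not None)
-- ===== Notes on version B (the rewrite author's own statement) =====
-- stated objective: simpler
-- what changed: Replaces A's index-based comprehension plus try/except-IndexError fallback loop with a single zip pass that relies on zip truncating at the shorter sequence, so no index access or exception handling remains.
import Mathlib
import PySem

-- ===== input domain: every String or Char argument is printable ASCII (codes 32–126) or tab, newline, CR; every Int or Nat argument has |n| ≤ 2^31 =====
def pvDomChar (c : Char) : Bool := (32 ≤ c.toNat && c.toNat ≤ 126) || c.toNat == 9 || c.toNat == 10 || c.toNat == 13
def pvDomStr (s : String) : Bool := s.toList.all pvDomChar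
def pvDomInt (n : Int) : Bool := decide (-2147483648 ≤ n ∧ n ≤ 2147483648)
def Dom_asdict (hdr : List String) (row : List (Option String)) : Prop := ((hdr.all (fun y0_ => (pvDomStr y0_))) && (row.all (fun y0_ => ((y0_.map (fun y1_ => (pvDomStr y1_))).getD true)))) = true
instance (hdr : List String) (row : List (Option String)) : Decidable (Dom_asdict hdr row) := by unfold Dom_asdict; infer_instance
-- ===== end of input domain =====

-- B replaces A's index-based comprehension and its try/except-IndexError fallback with a
-- single zip pass that truncates at the shorter sequence (objective: simpler).


-- ===== PORT A =====
-- the try-block comprehension: iterate i over range(len(flds)); row[i] may raise IndexError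
-- (result none); flds[i] is the current field of the structural walk.
def asdictTry (flds : List String) (row : List (Option String)) (i : Int)
    (acc : List (String × String)) : Option (List (String × String)) :=
  match flds with
  | [] => some acc
  | f :: rest =>
    match PySem.List.pyGet? row i with
    | none => none                                   -- IndexError: abandon the comprehension
    | some none => asdictTry rest row (i + 1) acc    -- row[i] is None: filtered out
    | some (some v) => asdictTry rest row (i + 1) (acc ++ [(f, v)])

-- the except-branch loop: for i, f in enumerate(flds), with the inner try/except giving v = None
-- when row[i] is out of range.
def asdictFallback (flds : List String) (row : List (Option String)) (i : Int)
    (items : List (String × String)) : List (String × String) :=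
  match flds with
  | [] => items
  | f :: rest =>
    match PySem.List.pyGetD row i none with
    | none => asdictFallback rest row (i + 1) items
    | some v => asdictFallback rest row (i + 1) (items ++ [(f, v)])

def asdict (hdr : List String) (row : List (Option String)) : List (String × String) :=
  let flds := hdr.map (fun f => f)       -- str(f) on a string is the string itself
  let items :=
    match asdictTry flds row 0 [] with
    | some its => its
    | none => asdictFallback flds row 0 []
  (PySem.Dict.ofList items : PySem.Dict String String).items

-- ===== PORT B =====
def asdict_alt (hdr : List String) (row : List (Option String)) : List (String × String) :=
  let flds := hdr.map (fun f => f)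
  (PySem.Dict.ofList ((flds.zip row).filterMap (fun fv => fv.2.map (fun v => (fv.1, v))))
    : PySem.Dict String String).items

-- ===== PRECONDITION & SPEC =====
def Spec_asdict (hdr : List String) (row : List (Option String)) (out : List (String × String)) : Prop := out = asdict_alt hdr row
instance (hdr : List String) (row : List (Option String)) (out : List (String × String)) : Decidable (Spec_asdict hdr row out) := by unfold Spec_asdict; infer_instance

-- ===== CLAIM (what is proved, stated in full; the proofs are below) =====
def Claim_equal_asdict : Prop := ∀ (hdr : List String) (row : List (Option String)), Dom_asdict hdr row → Spec_asdict hdr row (asdict hdr row)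

-- ===== LEMMAS AND PROOFS =====

-- B's pair list, as a function of the remaining fields and remaining row
def zipItems (flds : List String) (row : List (Option String)) : List (String × String) :=
  (flds.zip row).filterMap (fun fv => fv.2.map (fun v => (fv.1, v)))

theorem zipItems_nil_right (flds : List String) : zipItems flds [] = [] := by
  cases flds <;> simp [zipItems]

theorem zipItems_cons (f : String) (flds : List String) (v : Option String)
    (row : List (Option String)) :
    zipItems (f :: flds) (v :: row) =
      (match v with | none => zipItems flds row | some s => (f, s) :: zipItems flds row) := by
  cases v <;> simp [zipItems]

theorem asdictTry_ok (flds : List String) (row : List (Option String)) :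
    ∀ (n : Nat) (acc : List (String × String)), n + flds.length ≤ row.length →
      asdictTry flds row (n : Int) acc = some (acc ++ zipItems flds (row.drop n)) := by
  induction flds with
  | nil => intro n acc h; simp [asdictTry, zipItems]
  | cons f rest ih =>
    intro n acc h
    have hn : n < row.length := by simp at h; omega
    have hdrop : row.drop n = row[n] :: row.drop (n + 1) := List.drop_eq_getElem_cons hn
    have hsucc : (n : Int) + 1 = ((n + 1 : Nat) : Int) := by push_cast; ring
    have hle : (n + 1) + rest.length ≤ row.length := by simp at h ⊢; omega
    rw [asdictTry, PySem.List.pyGet?_natCast, List.getElem?_eq_getElem hn, hdrop, hsucc]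
    cases hv : row[n] with
    | none =>
      show asdictTry rest row ((n + 1 : Nat) : Int) acc = _
      rw [ih (n + 1) acc hle]; simp [zipItems_cons]
    | some v =>
      show asdictTry rest row ((n + 1 : Nat) : Int) (acc ++ [(f, v)]) = _
      rw [ih (n + 1) (acc ++ [(f, v)]) hle]; simp [zipItems_cons]

theorem asdictFallback_spec (flds : List String) (row : List (Option String)) :
    ∀ (n : Nat) (acc : List (String × String)),
      asdictFallback flds row (n : Int) acc = acc ++ zipItems flds (row.drop n) := by
  induction flds with
  | nil => intro n acc; simp [asdictFallback, zipItems]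
  | cons f rest ih =>
    intro n acc
    have hsucc : (n : Int) + 1 = ((n + 1 : Nat) : Int) := by push_cast; ring
    rw [asdictFallback, PySem.List.pyGetD_natCast, hsucc]
    by_cases hn : n < row.length
    · have hdrop : row.drop n = row[n] :: row.drop (n + 1) := List.drop_eq_getElem_cons hn
      rw [List.getD_eq_getElem _ _ hn, hdrop]
      cases hv : row[n] with
      | none =>
        show asdictFallback rest row ((n + 1 : Nat) : Int) acc = _
        rw [ih (n + 1) acc]; simp [zipItems_cons]
      | some v =>
        show asdictFallback rest row ((n + 1 : Nat) : Int) (acc ++ [(f, v)]) = _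
        rw [ih (n + 1) (acc ++ [(f, v)])]; simp [zipItems_cons]
    · have h1 : row.drop n = [] := List.drop_eq_nil_of_le (by omega)
      have h2 : row.drop (n + 1) = [] := List.drop_eq_nil_of_le (by omega)
      have hg : row.getD n none = none := by
        simp [List.getD]
        rw [List.getElem?_eq_none (by omega)]
        rfl
      rw [hg, ih (n + 1) acc, h1, h2]
      simp [zipItems_nil_right]

-- items of A equal items of B whether or not the try-block succeeds
theorem asdict_items (flds : List String) (row : List (Option String)) :
    (match asdictTry flds row 0 [] with
     | some its => its
     | none => asdictFallback flds row 0 []) = zipItems flds row := by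
  by_cases h : flds.length ≤ row.length
  · have := asdictTry_ok flds row 0 [] (by omega)
    simp at this; rw [this]
  · cases htry : asdictTry flds row 0 [] with
    | none =>
      have := asdictFallback_spec flds row 0 []
      simpa using this
    | some its =>
      -- the try loop returns none whenever flds is longer than row; derive a contradiction
      exfalso
      -- show asdictTry = none under ¬ length ≤ by an auxiliary induction
      have hnone : ∀ (fl : List String) (n : Nat) (acc : List (String × String)),
          fl ≠ [] → row.length < n + fl.length → asdictTry fl row (n : Int) acc = none := by
        intro fl
        induction fl with
        | nil => intro n acc hne _; exact absurd rfl hne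
        | cons f rest ih =>
          intro n acc _ hh
          by_cases hn : n < row.length
          · have hne : rest ≠ [] := by
              intro he; rw [he] at hh; simp at hh; omega
            have hsucc : (n : Int) + 1 = ((n + 1 : Nat) : Int) := by push_cast; ring
            rw [asdictTry, PySem.List.pyGet?_natCast, List.getElem?_eq_getElem hn, hsucc]
            cases row[n] with
            | none => exact ih (n + 1) acc hne (by simp at hh ⊢; omega)
            | some v => exact ih (n + 1) (acc ++ [(f, v)]) hne (by simp at hh ⊢; omega)
          · rw [asdictTry, PySem.List.pyGet?_natCast, List.getElem?_eq_none (by omega)]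
      have hfne : flds ≠ [] := by
        intro he; rw [he] at h; simp at h
      have := hnone flds 0 [] hfne (by simp; omega)
      simp at this
      rw [this] at htry
      simp at htry

-- ===== VERDICT (by name: the statement is the Claim_ definition above) =====
theorem asdict_spec : Claim_equal_asdict := by
  intro hdr row _
  unfold Spec_asdict asdict asdict_alt
  simp only []
  rw [asdict_items]
  rfl
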